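-- pv_equiv track=rewrite | github.com/magic-YuanTian/Selective-Prompt-Anchoring | obsolete/obsolete/weighted_utils/weighted_text_utils.py | get_masked_prompt_list_single_tok
-- ===== SOURCE A (Python) =====
-- import copy
--
-- def get_masked_prompt_list_single_tok(prompt):
--     # split the prompt into a list of tokens
--     prompt_token_list = prompt.split()
--
--     # for each token, replace it with <unk>, and get the masked prompt
--     masked_prompt_list = []
--     for i in range(len(prompt_token_list)):
--         masked_prompt = copy.deepcopy(prompt_token_list)
--         masked_prompt[i] = "<unk>"
--         masked_prompt = " ".join(masked_prompt)
--         masked_prompt_list.append(masked_prompt)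
--
--     return masked_prompt_list
-- ===== SOURCE B (Python) =====
-- def get_masked_prompt_list_single_tok(prompt):
--     tokens = prompt.split()
--     joined = " ".join(tokens)
--     result = []
--     start = 0
--     for tok in tokens:
--         end = start + len(tok)
--         result.append(joined[:start] + "<unk>" + joined[end:])
--         start = end + 1
--     return result
-- ===== Notes on version B (the rewrite author's own statement) =====
-- stated objective: alternative
-- what changed: B joins the tokens once and produces each variant by splicing the mask token into that single immutable joined string at accumulated character offsets, instead of deep-copying the token list, mutating one slot and re-joining it for every index.
import Mathlib
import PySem

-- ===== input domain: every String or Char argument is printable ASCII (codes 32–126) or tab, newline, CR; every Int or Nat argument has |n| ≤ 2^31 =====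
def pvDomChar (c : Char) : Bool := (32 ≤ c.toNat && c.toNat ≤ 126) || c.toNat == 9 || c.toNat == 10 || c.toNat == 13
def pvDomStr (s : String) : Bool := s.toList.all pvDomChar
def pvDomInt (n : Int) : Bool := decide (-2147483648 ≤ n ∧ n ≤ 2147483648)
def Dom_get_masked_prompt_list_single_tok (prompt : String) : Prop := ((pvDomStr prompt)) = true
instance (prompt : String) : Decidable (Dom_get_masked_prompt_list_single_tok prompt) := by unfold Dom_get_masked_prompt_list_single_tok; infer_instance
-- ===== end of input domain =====

-- B joins the tokens once and splices "<unk>" into that one joined string at accumulated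
-- offsets, instead of deep-copying the token list, mutating one slot and re-joining per index.

-- ===== PORT A =====
-- tokens = prompt.split(); for i in range(len(tokens)): copy, set slot i to "<unk>", " ".join, append
def get_masked_prompt_list_single_tok (prompt : String) : List String :=
  let prompt_token_list := PySem.Str.split₀ prompt
  (PySem.List.pyRange 0 (prompt_token_list.length : Int) 1).foldl
    (fun acc i =>
      -- deepcopy is identity on a list of immutable strings; i ∈ range(len) is nonneg and in range
      let masked_prompt := prompt_token_list.set i.toNat "<unk>"
      acc ++ [PySem.Str.join " " masked_prompt])
    []

-- ===== PORT B =====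
-- tokens = prompt.split(); joined = " ".join(tokens); one pass over tokens keeping the start
-- offset, emitting joined[:start] + "<unk>" + joined[end:].  Strings are handled as their
-- code-point lists (PySem.Chars); for the nonnegative in-range offsets kept here, the slices
-- joined[:start] / joined[end:] are exactly List.take start / List.drop end.
def get_masked_prompt_list_single_tok_alt (prompt : String) : List String :=
  let tokens := PySem.Str.split₀ prompt
  let joined := PySem.Chars.join " ".toList (tokens.map String.toList)
  (tokens.foldl
    (fun (st : Nat × List String) tok =>
      (st.1 + tok.toList.length + 1,
       st.2 ++ [String.ofList (joined.take st.1 ++ "<unk>".toList ++ joined.drop (st.1 + tok.toList.length))]))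
    (0, [])).2

-- ===== PRECONDITION & SPEC =====
def Spec_get_masked_prompt_list_single_tok (prompt : String) (out : List String) : Prop := out = get_masked_prompt_list_single_tok_alt prompt
instance (prompt : String) (out : List String) : Decidable (Spec_get_masked_prompt_list_single_tok prompt out) := by unfold Spec_get_masked_prompt_list_single_tok; infer_instance

-- ===== CLAIM (what is proved, stated in full; the proofs are below) =====
def Claim_equal_get_masked_prompt_list_single_tok : Prop := ∀ (prompt : String), Dom_get_masked_prompt_list_single_tok prompt → Spec_get_masked_prompt_list_single_tok prompt (get_masked_prompt_list_single_tok prompt)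

-- ===== LEMMAS AND PROOFS =====

theorem pvTakeAppendLen {α : Type} (a b : List α) (j : Nat) :
    (a ++ b).take (a.length + j) = a ++ b.take j := by
  simp [List.take_append, List.take_of_length_le]

theorem pvDropAppendLen {α : Type} (a b : List α) (j : Nat) :
    (a ++ b).drop (a.length + j) = b.drop j := by
  simp [List.drop_append, List.drop_of_length_le]

-- offset of token i inside " ".join(ts): each earlier token contributes its length plus one space
def pvOff (ts : List (List Char)) (i : Nat) : Nat :=
  match ts, i with
  | [], _ => 0
  | _, 0 => 0
  | t :: ts', i + 1 => t.length + 1 + pvOff ts' i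

-- replacing token i in the list before joining = splicing at its offset after joining
theorem pvJoin_set (ts : List (List Char)) (u : List Char) (i : Nat) (h : i < ts.length) :
    PySem.Chars.join [' '] (ts.set i u) =
      (PySem.Chars.join [' '] ts).take (pvOff ts i) ++ u ++
      (PySem.Chars.join [' '] ts).drop (pvOff ts i + ts[i].length) := by
  induction ts generalizing i with
  | nil => simp at h
  | cons t ts' ih =>
    cases i with
    | zero =>
      cases ts' with
      | nil => simp [pvOff, PySem.Chars.join_singleton]
      | cons b rest =>
        rw [List.set_cons_zero, PySem.Chars.join_cons_cons, PySem.Chars.join_cons_cons]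
        simp only [pvOff, List.take_zero, List.nil_append, Nat.zero_add, List.getElem_cons_zero]
        rw [List.append_assoc t [' '], ← Nat.add_zero t.length, pvDropAppendLen]
        simp
    | succ i =>
      have hi : i < ts'.length := by simpa using h
      obtain ⟨b, rest, rfl⟩ : ∃ b rest, ts' = b :: rest := by
        cases ts' with
        | nil => simp at hi
        | cons b rest => exact ⟨b, rest, rfl⟩
      obtain ⟨b', rest', hbr⟩ : ∃ b' rest', (b :: rest).set i u = b' :: rest' := by
        cases hx : (b :: rest).set i u with
        | nil => cases i <;> simp [List.set] at hx
        | cons b' rest' => exact ⟨b', rest', rfl⟩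
      have lhs : PySem.Chars.join [' '] ((t :: b :: rest).set (i + 1) u)
          = (t ++ [' ']) ++ PySem.Chars.join [' '] ((b :: rest).set i u) := by
        rw [show (t :: b :: rest).set (i + 1) u = t :: (b :: rest).set i u from rfl, hbr,
          PySem.Chars.join_cons_cons, ← hbr, List.append_assoc]
      have rhsJ : PySem.Chars.join [' '] (t :: b :: rest)
          = (t ++ [' ']) ++ PySem.Chars.join [' '] (b :: rest) := by
        rw [PySem.Chars.join_cons_cons, List.append_assoc]
      have hoff : pvOff (t :: b :: rest) (i + 1) = (t ++ [' ']).length + pvOff (b :: rest) i := by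
        simp [pvOff]
      have hidx : (t :: b :: rest)[i + 1] = (b :: rest)[i] := rfl
      rw [lhs, ih i hi, rhsJ, hoff, hidx,
        show (t ++ [' ']).length + pvOff (b :: rest) i + (b :: rest)[i].length
           = (t ++ [' ']).length + (pvOff (b :: rest) i + (b :: rest)[i].length) by omega,
        pvTakeAppendLen, pvDropAppendLen]
      simp

-- B's fold, started at offset s with accumulator acc, appends one splice per remaining token
theorem pvFoldB (joined : List Char) (ts : List String) (s : Nat) (acc : List String) :
    (ts.foldl
      (fun (st : Nat × List String) tok =>
        (st.1 + tok.toList.length + 1,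
         st.2 ++ [String.ofList (joined.take st.1 ++ "<unk>".toList ++ joined.drop (st.1 + tok.toList.length))]))
      (s, acc)).2 =
    acc ++ (List.range ts.length).map (fun k =>
      String.ofList (joined.take (s + pvOff (ts.map String.toList) k) ++ "<unk>".toList ++
        joined.drop (s + pvOff (ts.map String.toList) k + ((ts.map String.toList).getD k []).length))) := by
  induction ts generalizing s acc with
  | nil => simp
  | cons t ts' ih =>
    rw [List.foldl_cons, ih, List.length_cons, List.range_succ_eq_map, List.map_cons,
      List.map_map, List.append_assoc, List.singleton_append]
    congr 1
    congr 1
    case e_tail =>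
      apply List.map_congr_left
      intro k _
      simp only [Function.comp_apply, Nat.succ_eq_add_one,
        show ((t :: ts').map String.toList) = t.toList :: ts'.map String.toList from rfl,
        List.getD_cons_succ,
        show pvOff (t.toList :: ts'.map String.toList) (k + 1)
           = t.toList.length + 1 + pvOff (ts'.map String.toList) k from rfl,
        show s + (t.toList.length + 1 + pvOff (ts'.map String.toList) k)
           = s + t.toList.length + 1 + pvOff (ts'.map String.toList) k from by omega]

-- ===== VERDICT (by name: the statement is the Claim_ definition above) =====
theorem get_masked_prompt_list_single_tok_spec : Claim_equal_get_masked_prompt_list_single_tok := by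
  intro prompt _
  show get_masked_prompt_list_single_tok prompt = get_masked_prompt_list_single_tok_alt prompt
  simp only [get_masked_prompt_list_single_tok, get_masked_prompt_list_single_tok_alt]
  rw [PySem.List.foldl_append_singleton_eq_map, pvFoldB, PySem.List.pyRange_one]
  simp only [sub_zero, Int.toNat_natCast, List.map_map, List.nil_append]
  apply List.map_congr_left
  intro k hk
  have hk' : k < (PySem.Str.split₀ prompt).length := List.mem_range.mp hk
  have hklen : k < ((PySem.Str.split₀ prompt).map String.toList).length := by
    rw [List.length_map]; exact hk'
  have hgetD : (((PySem.Str.split₀ prompt).map String.toList).getD k []).length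
      = ((PySem.Str.split₀ prompt).map String.toList)[k].length := by
    rw [List.getD_eq_getElem _ _ hklen]
  apply String.toList_injective
  simp only [Function.comp]
  rw [PySem.Str.toList_join, String.toList_ofList,
    show ((0 : Int) + (k : Int)).toNat = k by omega, List.map_set,
    pvJoin_set _ _ k hklen, hgetD]
  simp
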